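-- pv_equiv track=rewrite | github.com/hew-lang/hew | scripts/viz/system-explorer.py | _cfg_parse_while
-- ===== SOURCE A (Python) =====
-- def _cfg_parse_while(lines: list[str], start: int) -> tuple[list[str], list[str], int]:
--     i = start
--     depth = 0
--     for ch in lines[i]:
--         if ch == "{":
--             depth += 1
--         elif ch == "}":
--             depth -= 1
--     cond_start = i + 1
--     do_boundary = None
--     i += 1
--     while i < len(lines):
--         stripped = lines[i].strip()
--         if "} do {" in stripped and depth == 1:
--             do_boundary = i
--             depth = 1
--             break
--         for ch in lines[i]:
--             if ch == "{":
--                 depth += 1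
--             elif ch == "}":
--                 depth -= 1
--         i += 1
--     if do_boundary is None:
--         return [], [], start + 1
--     cond_lines = lines[cond_start:do_boundary]
--     body_start = do_boundary + 1
--     j = body_start
--     while j < len(lines):
--         for ch in lines[j]:
--             if ch == "{":
--                 depth += 1
--             elif ch == "}":
--                 depth -= 1
--         if depth == 0:
--             return cond_lines, lines[body_start:j], j + 1
--         j += 1
--     return cond_lines, lines[body_start:], len(lines)
-- ===== SOURCE B (Python) =====
-- def _cfg_parse_while(lines: list[str], start: int) -> tuple[list[str], list[str], int]:
--     n = len(lines)
--     # brace delta of the while-header line itself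
--     d0 = lines[start].count("{") - lines[start].count("}")
--     # one pass: prefix sums of per-line brace deltas; pre[i] = total delta of lines[:i]
--     pre = [0]
--     total = 0
--     for line in lines:
--         total += line.count("{") - line.count("}")
--         pre.append(total)
--     db = None
--     for i in range(start + 1, n):
--         if d0 + pre[i] - pre[start + 1] == 1 and "} do {" in lines[i].strip():
--             db = i
--             break
--     if db is None:
--         return [], [], start + 1
--     p1 = pre[db + 1]
--     for j in range(db + 1, n):
--         if 1 + pre[j + 1] - p1 == 0:
--             return lines[start + 1:db], lines[db + 1:j], j + 1
--     return lines[start + 1:db], lines[db + 1:], n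
-- ===== Notes on version B (the rewrite author's own statement) =====
-- stated objective: alternative
-- what changed: B precomputes a prefix-sum array of per-line brace deltas in one pass and then finds the '} do {' boundary and the closing line by two pure index searches comparing prefix-sum differences, instead of A's three loops that mutate a carried depth counter character by character.
-- outside the precondition, e.g. on _cfg_parse_while(['{', '} do {', '}'], -3): A returns ([], [], 0), B returns ([], ['}'], 3)
import Mathlib
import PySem

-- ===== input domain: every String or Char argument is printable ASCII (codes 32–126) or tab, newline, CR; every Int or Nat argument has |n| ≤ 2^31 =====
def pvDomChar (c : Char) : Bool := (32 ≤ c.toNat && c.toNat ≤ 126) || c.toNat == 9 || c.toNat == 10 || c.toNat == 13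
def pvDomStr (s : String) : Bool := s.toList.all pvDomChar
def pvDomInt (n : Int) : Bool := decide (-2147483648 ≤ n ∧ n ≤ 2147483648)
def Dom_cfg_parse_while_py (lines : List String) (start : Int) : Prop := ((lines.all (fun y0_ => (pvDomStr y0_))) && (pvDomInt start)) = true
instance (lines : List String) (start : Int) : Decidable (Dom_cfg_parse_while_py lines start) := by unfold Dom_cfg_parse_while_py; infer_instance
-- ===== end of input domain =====

-- B replaces A's stateful carried-depth scans by a precomputed prefix-sum array of per-line
-- brace deltas plus two pure index searches over it; objective: alternative (no speed claim).

-- ===== PORT A =====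
-- the per-character depth loop of A ('for ch in lines[i]: …')
def pvBraceFoldA (d : Int) (cs : List Char) : Int :=
  cs.foldl (fun depth ch => if ch = '{' then depth + 1 else if ch = '}' then depth - 1 else depth) d

-- A's first while loop: scan for the '} do {' boundary (returns its index), carrying depth
def pvFindDoA (lines : List String) (i : Nat) (depth : Int) : Option Nat :=
  if h : i < lines.length then
    if PySem.Str.isIn "} do {" (PySem.Str.strip lines[i]) && depth == 1 then some i
    else pvFindDoA lines (i + 1) (pvBraceFoldA depth lines[i].toList)
  else none
termination_by lines.length - i

-- A's second while loop: scan for depth 0, returning the full triple as A does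
def pvBodyA (lines : List String) (cond : List String) (bodyStart : Nat) (j : Nat) (depth : Int) :
    List String × List String × Int :=
  if h : j < lines.length then
    let d := pvBraceFoldA depth lines[j].toList
    if d = 0 then (cond, PySem.List.slice lines (some (bodyStart : Int)) (some (j : Int)), (j : Int) + 1)
    else pvBodyA lines cond bodyStart (j + 1) d
  else (cond, PySem.List.slice lines (some (bodyStart : Int)) none, (lines.length : Int))
termination_by lines.length - j

-- index loops are transcribed with Nat indices, exact for 0 ≤ start (Pre_); lines[start]
-- itself goes through pyGet? (none = IndexError, excluded by Pre_)
def cfg_parse_while_py (lines : List String) (start : Int) : List String × List String × Int :=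
  match PySem.List.pyGet? lines start with
  | none => ([], [], start + 1)
  | some first =>
    let depth := pvBraceFoldA 0 first.toList
    match pvFindDoA lines ((start + 1).toNat) depth with
    | none => ([], [], start + 1)
    | some db =>
      pvBodyA lines (PySem.List.slice lines (some (start + 1)) (some (db : Int))) (db + 1) (db + 1) 1

-- ===== PORT B =====
def pvDeltaB (line : String) : Int :=
  (PySem.Str.count line "{" : Int) - (PySem.Str.count line "}" : Int)

-- Source B's first loop: build the prefix-sum list 'pre' (pre[i] = total delta of lines[:i])
def pvPreB (lines : List String) : List Int :=
  (lines.foldl (fun (st : List Int × Int) line =>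
      (st.1 ++ [st.2 + pvDeltaB line], st.2 + pvDeltaB line)) ([0], 0)).1

-- pre[i] with Python indexing; in range wherever Source B evaluates it under Pre_ (comment: exact there)
def pvPreAt (pre : List Int) (i : Int) : Int :=
  (PySem.List.pyGet? pre i).getD 0

-- Source B's do-search: first i in the range with d0 + pre[i] - pre[start+1] == 1
-- and '} do {' in the stripped line
def pvFindDoB (lines : List String) (pre : List Int) (d0 p0 : Int) : List Int → Option Int
  | [] => none
  | i :: rest =>
    if d0 + pvPreAt pre i - p0 == 1 &&
        PySem.Str.isIn "} do {" (PySem.Str.strip ((PySem.List.pyGet? lines i).getD "")) then some i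
    else pvFindDoB lines pre d0 p0 rest

-- Source B's end-search: first j in the range with 1 + pre[j+1] - p1 == 0
def pvFindEndB (pre : List Int) (p1 : Int) : List Int → Option Int
  | [] => none
  | j :: rest => if 1 + pvPreAt pre (j + 1) - p1 == 0 then some j else pvFindEndB pre p1 rest

-- lines[start] goes through pyGet? (none = IndexError, excluded by Pre_)
def cfg_parse_while_py_alt (lines : List String) (start : Int) : List String × List String × Int :=
  match PySem.List.pyGet? lines start with
  | none => ([], [], start + 1)
  | some first =>
  let pre := pvPreB lines
  match pvFindDoB lines pre (pvDeltaB first) (pvPreAt pre (start + 1))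
      (PySem.List.pyRange (start + 1) (lines.length : Int) 1) with
  | none => ([], [], start + 1)
  | some db =>
    match pvFindEndB pre (pvPreAt pre (db + 1)) (PySem.List.pyRange (db + 1) (lines.length : Int) 1) with
    | some j => (PySem.List.slice lines (some (start + 1)) (some db),
                 PySem.List.slice lines (some (db + 1)) (some j), j + 1)
    | none => (PySem.List.slice lines (some (start + 1)) (some db),
               PySem.List.slice lines (some (db + 1)) none, (lines.length : Int))

-- ===== PRECONDITION & SPEC =====
-- Pre_ restricts to the natural domain of a line index: for start ≥ len(lines) or
-- start < -len(lines) A raises IndexError, and for -len(lines) ≤ start < 0 A's value comes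
-- from negative-index wraparound, outside the function's natural domain of a forward scan.
def Pre_cfg_parse_while_py (lines : List String) (start : Int) : Prop :=
  0 ≤ start ∧ start < lines.length
instance (lines : List String) (start : Int) : Decidable (Pre_cfg_parse_while_py lines start) := by
  unfold Pre_cfg_parse_while_py; infer_instance

def pvWitness_cfg_parse_while_py : List String × Int :=
  (["while x {", "x", "} do {", "y", "}"], 0)

def Spec_cfg_parse_while_py (lines : List String) (start : Int) (out : List String × List String × Int) : Prop :=
  out = cfg_parse_while_py_alt lines start
instance (lines : List String) (start : Int) (out : List String × List String × Int) :
    Decidable (Spec_cfg_parse_while_py lines start out) := by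
  unfold Spec_cfg_parse_while_py; infer_instance

-- ===== CLAIM (what is proved, stated in full; the proofs are below) =====
def Claim_equal_cfg_parse_while_py : Prop :=
  ∀ (lines : List String) (start : Int), Dom_cfg_parse_while_py lines start →
    Pre_cfg_parse_while_py lines start →
    Spec_cfg_parse_while_py lines start (cfg_parse_while_py lines start)

-- ===== LEMMAS AND PROOFS =====

-- single-character substring count is character count (helper for pv_count_single)
lemma pv_go_single (c : Char) : ∀ (cs : List Char) (fuel acc : Nat), cs.length ≤ fuel →
    PySem.Chars.count.go [c] fuel cs acc = acc + cs.count c := by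
  intro cs
  induction cs with
  | nil => intro fuel acc _; cases fuel <;> simp [PySem.Chars.count.go]
  | cons h t ih =>
    intro fuel acc hf
    cases fuel with
    | zero => simp at hf
    | succ f =>
      rw [PySem.Chars.count.go]
      have ht : t.length ≤ f := by simpa using hf
      by_cases hc : c = h
      · subst hc
        simp [List.isPrefixOf, ih f (acc+1) ht]
        omega
      · simp [List.isPrefixOf, hc, ih f acc ht, Ne.symm hc]

lemma pv_count_single (cs : List Char) (c : Char) :
    PySem.Chars.count cs [c] = cs.count c := by
  simp [PySem.Chars.count, pv_go_single c cs cs.length 0 le_rfl]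

lemma pv_fold_count (cs : List Char) : ∀ d : Int,
    pvBraceFoldA d cs = d + (cs.count '{' : Int) - (cs.count '}' : Int) := by
  induction cs with
  | nil => intro d; simp [pvBraceFoldA]
  | cons h t ih =>
    intro d
    simp only [pvBraceFoldA, List.foldl_cons] at *
    by_cases h1 : h = '{'
    · simp [h1, ih]; ring
    · by_cases h2 : h = '}'
      · simp [h2, ih]; ring
      · simp [h1, h2, ih]

-- A's per-character fold is B's count difference
lemma pv_delta_eq (d : Int) (s : String) :
    pvBraceFoldA d s.toList = d + pvDeltaB s := by
  simp [pvDeltaB, PySem.Str.count_eq, pv_fold_count, pv_count_single]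
  ring

lemma pv_findDo_bounds (lines : List String) : ∀ (i : Nat) (depth : Int) (db : Nat),
    pvFindDoA lines i depth = some db → i ≤ db ∧ db < lines.length := by
  intro i
  induction hk : lines.length - i using Nat.strong_induction_on generalizing i with
  | _ k ihk =>
    intro depth db h
    rw [pvFindDoA] at h
    split at h
    · next hlt =>
      split at h
      · obtain rfl := Option.some.inj h
        exact ⟨le_rfl, hlt⟩
      · have := ihk (lines.length - (i+1)) (by omega) (i+1) rfl _ _ h
        omega
    · exact absurd h (by simp)

-- total brace delta of a list of lines
def pvSumD (ls : List String) : Int := (ls.map pvDeltaB).sum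

-- proof-side closed form of Source B's prefix list tail
def pvPreList (c : Int) : List String → List Int
  | [] => []
  | l :: ls => (c + pvDeltaB l) :: pvPreList (c + pvDeltaB l) ls

lemma pv_preB_foldl : ∀ (ls : List String) (acc : List Int) (c : Int),
    (ls.foldl (fun (st : List Int × Int) line =>
      (st.1 ++ [st.2 + pvDeltaB line], st.2 + pvDeltaB line)) (acc, c)).1 = acc ++ pvPreList c ls := by
  intro ls
  induction ls with
  | nil => intro acc c; simp [pvPreList]
  | cons l ls ih => intro acc c; simp [pvPreList, ih]

lemma pv_preB_eq (lines : List String) : pvPreB lines = 0 :: pvPreList 0 lines := by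
  simp [pvPreB, pv_preB_foldl]

lemma pv_preList_get : ∀ (ls : List String) (c : Int) (i : Nat), i < ls.length →
    (pvPreList c ls)[i]? = some (c + pvSumD (ls.take (i + 1))) := by
  intro ls
  induction ls with
  | nil => intro c i h; simp at h
  | cons l ls ih =>
    intro c i h
    cases i with
    | zero => simp [pvPreList, pvSumD]
    | succ i =>
      have h' : i < ls.length := by simpa using h
      simp only [pvPreList, List.getElem?_cons_succ, ih (c + pvDeltaB l) i h',
        List.take_succ_cons, pvSumD, List.map_cons, List.sum_cons, Option.some.injEq]
      ring

lemma pv_preAt_eq (lines : List String) (i : Nat) (h : i ≤ lines.length) :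
    pvPreAt (pvPreB lines) (i : Int) = pvSumD (lines.take i) := by
  rw [pvPreAt, PySem.List.pyGet?_natCast, pv_preB_eq]
  cases i with
  | zero => simp [pvSumD]
  | succ i =>
    have : (pvPreList 0 lines)[i]? = some (0 + pvSumD (lines.take (i + 1))) :=
      pv_preList_get lines 0 i (by omega)
    simp [this]

lemma pv_sum_take_succ (lines : List String) (i : Nat) (h : i < lines.length) :
    pvSumD (lines.take (i + 1)) = pvSumD (lines.take i) + pvDeltaB lines[i] := by
  have h2 : lines.take (i + 1) = lines.take i ++ [lines[i]] := by
    rw [List.take_add_one]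
    simp [List.getElem?_eq_getElem h]
  rw [h2]
  simp only [pvSumD, List.map_append, List.sum_append, List.map_cons, List.map_nil,
    List.sum_cons, List.sum_nil]
  ring

-- B's do-search over the index range equals A's carried-depth scan
lemma pv_findB_eq (lines : List String) : ∀ (i : Nat), i ≤ lines.length → ∀ (d0 p0 depth : Int),
    depth = d0 + pvSumD (lines.take i) - p0 →
    pvFindDoB lines (pvPreB lines) d0 p0 (PySem.List.pyRange (i : Int) (lines.length : Int) 1) =
      (pvFindDoA lines i depth).map (fun k => (k : Int)) := by
  intro i
  induction hk : lines.length - i using Nat.strong_induction_on generalizing i with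
  | _ k ihk =>
    intro hi d0 p0 depth hd
    by_cases hlt : i < lines.length
    · rw [PySem.List.pyRange_one_cons (by exact_mod_cast hlt), pvFindDoB, pvFindDoA, dif_pos hlt]
      have hpre : pvPreAt (pvPreB lines) (i : Int) = pvSumD (lines.take i) := pv_preAt_eq lines i hi
      have hget : (PySem.List.pyGet? lines (i : Int)).getD "" = lines[i] := by
        simp [PySem.List.pyGet?_natCast, List.getElem?_eq_getElem hlt]
      rw [hpre, hget]
      have hcond : (d0 + pvSumD (lines.take i) - p0 == 1) = (depth == 1) := by rw [hd]
      by_cases hc : (PySem.Str.isIn "} do {" (PySem.Str.strip lines[i]) && depth == 1) = true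
      · have hc' : (d0 + pvSumD (lines.take i) - p0 == 1 &&
            PySem.Str.isIn "} do {" (PySem.Str.strip lines[i])) = true := by
          rw [hcond, Bool.and_comm]; exact hc
        rw [if_pos hc', if_pos hc]
        simp
      · have hc' : ¬ (d0 + pvSumD (lines.take i) - p0 == 1 &&
            PySem.Str.isIn "} do {" (PySem.Str.strip lines[i])) = true := by
          rw [hcond, Bool.and_comm]; exact hc
        rw [if_neg hc', if_neg hc]
        have hcast : (i : Int) + 1 = ((i + 1 : Nat) : Int) := by push_cast; ring
        rw [hcast]
        exact ihk (lines.length - (i + 1)) (by omega) (i + 1) rfl (by omega) d0 p0 _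
          (by rw [pv_delta_eq, hd, pv_sum_take_succ lines i hlt]; ring)
    · have hi' : i = lines.length := by omega
      rw [PySem.List.pyRange_one_eq_nil (by exact_mod_cast hi'.ge), pvFindDoB,
        pvFindDoA, dif_neg hlt]
      simp

-- B's end-search over the index range equals A's second carried-depth scan
lemma pv_endB_eq (lines : List String) (cond : List String) (bs : Nat) :
    ∀ (j : Nat), j ≤ lines.length → ∀ (p1 depth : Int),
    depth = 1 + pvSumD (lines.take j) - p1 →
    pvBodyA lines cond bs j depth =
      (match pvFindEndB (pvPreB lines) p1 (PySem.List.pyRange (j : Int) (lines.length : Int) 1) with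
        | some jj => (cond, PySem.List.slice lines (some (bs : Int)) (some jj), jj + 1)
        | none => (cond, PySem.List.slice lines (some (bs : Int)) none, (lines.length : Int))) := by
  intro j
  induction hk : lines.length - j using Nat.strong_induction_on generalizing j with
  | _ k ihk =>
    intro hj p1 depth hd
    by_cases hlt : j < lines.length
    · rw [PySem.List.pyRange_one_cons (by exact_mod_cast hlt), pvFindEndB, pvBodyA, dif_pos hlt]
      have hpre : pvPreAt (pvPreB lines) ((j : Int) + 1) = pvSumD (lines.take (j + 1)) := by
        rw [show (j : Int) + 1 = ((j + 1 : Nat) : Int) by push_cast; ring]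
        exact pv_preAt_eq lines (j + 1) (by omega)
      have hdval : pvBraceFoldA depth lines[j].toList = 1 + pvSumD (lines.take (j + 1)) - p1 := by
        rw [pv_delta_eq, hd, pv_sum_take_succ lines j hlt]; ring
      rw [hpre, hdval]
      by_cases hz : 1 + pvSumD (lines.take (j + 1)) - p1 = 0
      · rw [if_pos hz, if_pos (beq_iff_eq.mpr hz)]
      · rw [if_neg hz, if_neg (by simp [hz])]
        have hcast : (j : Int) + 1 = ((j + 1 : Nat) : Int) := by push_cast; ring
        rw [hcast]
        exact ihk (lines.length - (j + 1)) (by omega) (j + 1) rfl (by omega) p1 _ (by omega)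
    · have hj' : j = lines.length := by omega
      rw [PySem.List.pyRange_one_eq_nil (by exact_mod_cast hj'.ge), pvFindEndB,
        pvBodyA, dif_neg hlt]

-- ===== VERDICT (by name: the statements are the Claim_ definitions above) =====
theorem cfg_parse_while_py_spec : Claim_equal_cfg_parse_while_py := by
  intro lines start _ hpre
  obtain ⟨h0, hlt⟩ := hpre
  unfold Spec_cfg_parse_while_py cfg_parse_while_py cfg_parse_while_py_alt
  obtain ⟨s, rfl⟩ : ∃ s : Nat, start = (s : Int) := ⟨start.toNat, (Int.toNat_of_nonneg h0).symm⟩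
  have hs : s < lines.length := by exact_mod_cast hlt
  have hget : PySem.List.pyGet? lines (s : Int) = some lines[s] := by
    simp [PySem.List.pyGet?_natCast, List.getElem?_eq_getElem hs]
  rw [hget]
  dsimp only
  have htn : ((s : Int) + 1).toNat = s + 1 := by omega
  have hcast1 : (s : Int) + 1 = ((s + 1 : Nat) : Int) := by push_cast; ring
  have hp0 : pvPreAt (pvPreB lines) ((s : Int) + 1) = pvSumD (lines.take (s + 1)) := by
    rw [hcast1]; exact pv_preAt_eq lines (s + 1) (by omega)
  rw [hp0, htn]
  have hfind := pv_findB_eq lines (s + 1) (by omega) (pvDeltaB lines[s])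
    (pvSumD (lines.take (s + 1))) (pvBraceFoldA 0 lines[s].toList)
    (by rw [pv_delta_eq]; ring)
  rw [hcast1, hfind]
  cases hdb : pvFindDoA lines (s + 1) (pvBraceFoldA 0 lines[s].toList) with
  | none => simp
  | some db =>
    dsimp only [Option.bind_some, Option.map_some, Option.pure_def, Option.bind_eq_bind]
    have hb := pv_findDo_bounds lines (s + 1) _ db hdb
    have hcast2 : (db : Int) + 1 = ((db + 1 : Nat) : Int) := by push_cast; ring
    have hp1 : pvPreAt (pvPreB lines) ((db : Int) + 1) = pvSumD (lines.take (db + 1)) := by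
      rw [hcast2]; exact pv_preAt_eq lines (db + 1) (by omega)
    rw [hp1, hcast2,
      pv_endB_eq lines (PySem.List.slice lines (some ((s + 1 : Nat) : Int)) (some (db : Int)))
        (db + 1) (db + 1) (by omega) (pvSumD (lines.take (db + 1))) 1 (by ring)]
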